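-- pv_equiv track=rewrite | github.com/vkrao100/course_docs | spring_18/ECE_6750/backup/Hw_6/python/functions.py | choose_shortest_row
-- ===== SOURCE A (Python) =====
-- def choose_shortest_row(A):
-- 	if(A == []):
-- 		return(-1)
-- 	r_count = len(A[0])
-- 	c_count = 0
-- 	r = 0
-- 	for i in range(len(A)):
-- 		c_count = 0
-- 		for j in range(len(A[0])):
-- 			if(A[i][j] == '1'):
-- 				c_count += 1
-- 		if(c_count<r_count):
-- 			r_count = c_count
-- 			r = i
-- 	return(r)
-- ===== SOURCE B (Python) =====
-- def choose_shortest_row(A):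
--     if A == []:
--         return -1
--     w = len(A[0])
--
--     def ones(i):
--         return A[i][:w].count('1')
--
--     def best(lo, hi):
--         # first index of the minimal count among rows lo..hi-1 (tournament recursion)
--         if hi - lo <= 1:
--             return lo
--         mid = (lo + hi) // 2
--         l = best(lo, mid)
--         r = best(mid, hi)
--         return l if ones(l) <= ones(r) else r
--
--     return best(0, len(A))
-- ===== Notes on version B (the rewrite author's own statement) =====
-- stated objective: alternative
-- what changed: Replaces A's fused left-to-right running-min double loop with a divide-and-conquer tournament: recursively find the best row index of each half and combine with a left-biased comparison, counting '1's per row via a width-bounded slice count instead of an index loop.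
import Mathlib
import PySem

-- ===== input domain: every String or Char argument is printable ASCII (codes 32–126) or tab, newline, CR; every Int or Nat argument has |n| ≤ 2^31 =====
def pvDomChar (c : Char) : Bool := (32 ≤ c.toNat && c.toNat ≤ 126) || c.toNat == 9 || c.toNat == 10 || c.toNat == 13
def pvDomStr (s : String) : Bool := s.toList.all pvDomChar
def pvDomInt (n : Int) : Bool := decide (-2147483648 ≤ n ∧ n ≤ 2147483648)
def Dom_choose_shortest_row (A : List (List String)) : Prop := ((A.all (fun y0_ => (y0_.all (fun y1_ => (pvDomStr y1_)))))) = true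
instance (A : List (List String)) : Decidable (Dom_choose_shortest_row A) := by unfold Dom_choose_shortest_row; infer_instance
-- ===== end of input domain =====

-- B replaces A's fused left-to-right running-min double loop with a divide-and-conquer tournament argmin over rows (left-biased combine), counting '1's by a width-bounded slice count; an alternative algorithm of similar cost.


-- ===== PORT A =====
def choose_shortest_row (A : List (List String)) : Int :=
  if A = [] then -1
  else
    let st := (PySem.List.pyRange 0 (PySem.List.len A) 1).foldl
      (fun (st : Int × Int) i =>
        let c_count := (PySem.List.pyRange 0 (PySem.List.len (PySem.List.pyGetD A 0 [])) 1).foldl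
          (fun c j => if PySem.List.pyGetD (PySem.List.pyGetD A i []) j "" = "1" then c + 1 else c)
          (0 : Int)
        if c_count < st.1 then (c_count, i) else st)
      ((PySem.List.len (PySem.List.pyGetD A 0 []), 0) : Int × Int)
    st.2

-- ===== PORT B =====
-- ones(i) of Source B: number of '1's in A[i][:w]
def pvOnes (A : List (List String)) (w : Nat) (i : Nat) : Int :=
  (PySem.List.count (PySem.List.slice (PySem.List.pyGetD A (i : Int) []) none (some (w : Int))) "1" : Int)

-- best(lo, hi) of Source B: tournament recursion; lo, hi are the nonnegative ints of the Python code
def pvBest (A : List (List String)) (w : Nat) (lo hi : Nat) : Nat :=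
  if hi - lo ≤ 1 then lo
  else
    let mid := (lo + hi) / 2
    let l := pvBest A w lo mid
    let r := pvBest A w mid hi
    if pvOnes A w l ≤ pvOnes A w r then l else r
termination_by hi - lo
decreasing_by all_goals omega

def choose_shortest_row_alt (A : List (List String)) : Int :=
  if A = [] then -1
  else (pvBest A (PySem.List.pyGetD A 0 []).length 0 A.length : Int)

-- ===== PRECONDITION & SPEC =====
-- Pre_ excludes exactly the ragged inputs on which A raises IndexError: some row shorter than the first row.
def Pre_choose_shortest_row (A : List (List String)) : Prop :=
  ∀ row ∈ A, (PySem.List.pyGetD A 0 []).length ≤ row.length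
instance (A : List (List String)) : Decidable (Pre_choose_shortest_row A) := by
  unfold Pre_choose_shortest_row; infer_instance
def pvWitness_choose_shortest_row : List (List String) := [["1", "0"], ["0", "0"]]

def Spec_choose_shortest_row (A : List (List String)) (out : Int) : Prop := out = choose_shortest_row_alt A
instance (A : List (List String)) (out : Int) : Decidable (Spec_choose_shortest_row A out) := by unfold Spec_choose_shortest_row; infer_instance

-- ===== CLAIM (what is proved, stated in full; the proofs are below) =====
def Claim_equal_choose_shortest_row : Prop := ∀ (A : List (List String)), Dom_choose_shortest_row A → Pre_choose_shortest_row A → Spec_choose_shortest_row A (choose_shortest_row A)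

-- ===== LEMMAS AND PROOFS =====

-- first-argmin running fold with key K and seed s: the common denominator of both ports
def pvFam (K : Int → Int) (s : Int) (l : List Int) : Int :=
  l.foldl (fun m i => if K i < K m then i else m) s

theorem pvFam_cons (K : Int → Int) (s h : Int) (t : List Int) :
    pvFam K s (h :: t) = if K (pvFam K h t) < K s then pvFam K h t else s := by
  induction t generalizing s h with
  | nil => simp [pvFam]
  | cons x t ih =>
    have e : pvFam K s (h :: x :: t) = pvFam K (if K h < K s then h else s) (x :: t) := by
      simp [pvFam]
    rw [e, ih, ih h x]
    by_cases hF : K (pvFam K x t) < K h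
    · rw [if_pos hF]
      by_cases hhs : K h < K s
      · rw [if_pos hhs, if_pos (lt_trans hF hhs), if_pos hF]
      · by_cases hFs : K (pvFam K x t) < K s
        · rw [if_neg hhs, if_pos hFs]
        · rw [if_neg hhs, if_neg hFs]
    · rw [if_neg hF]
      by_cases hhs : K h < K s
      · rw [if_pos hhs, if_neg hF]
      · have hFs : ¬ K (pvFam K x t) < K s := by omega
        rw [if_neg hhs, if_neg hFs]

-- A's (r_count, r) fold projects to the first-argmin fold
theorem pv_fold_bridge (K : Int → Int) (l : List Int) (m : Int) :
    (l.foldl (fun (st : Int × Int) i => if K i < st.1 then (K i, i) else st) (K m, m)).2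
      = pvFam K m l := by
  induction l generalizing m with
  | nil => rfl
  | cons x t ih =>
    simp only [List.foldl_cons, pvFam] at *
    by_cases h : K x < K m
    · simp only [h, if_true]; exact ih x
    · simp only [h, if_false]; exact ih m

-- B's key as a function of an Int index
def pvKey (A : List (List String)) (w : Nat) (i : Int) : Int :=
  (PySem.List.count (PySem.List.slice (PySem.List.pyGetD A i []) none (some (w : Int))) "1" : Int)

theorem pvOnes_eq (A : List (List String)) (w i : Nat) :
    pvOnes A w i = pvKey A w (i : Int) := rfl

-- A's inner index loop equals the slice count when the row is long enough
theorem pv_inner (A : List (List String)) (w : Nat) (i : Int)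
    (hlen : w ≤ (PySem.List.pyGetD A i []).length) :
    (PySem.List.pyRange 0 (w : Int) 1).foldl
      (fun c j => if PySem.List.pyGetD (PySem.List.pyGetD A i []) j "" = "1" then c + 1 else c)
      (0 : Int)
    = pvKey A w i := by
  set row := PySem.List.pyGetD A i [] with hrow
  set t := row.take w with ht
  have htl : t.length = w := by simp [ht]; omega
  have hfold1 :
      (PySem.List.pyRange 0 (w : Int) 1).foldl
        (fun c j => if PySem.List.pyGetD row j "" = "1" then c + 1 else c) (0 : Int)
      = (PySem.List.pyRange 0 (PySem.List.len t) 1).foldl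
        (fun c j => if PySem.List.pyGetD t j "" = "1" then c + 1 else c) (0 : Int) := by
    rw [PySem.List.len_eq, htl]
    apply PySem.List.foldl_congr_mem
    intro acc j hj
    rw [PySem.List.mem_pyRange_one] at hj
    have hjt : j < (t.length : Int) := by omega
    have hjr : j < (row.length : Int) := by omega
    rw [PySem.List.pyGetD_eq_getElem row "" hj.1 hjr,
        PySem.List.pyGetD_eq_getElem t "" hj.1 hjt]
    simp [ht, List.getElem_take]
  rw [hfold1, PySem.List.foldl_pyRange_zero_pyGetD t "" (fun c x => if x = "1" then c + 1 else c) 0]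
  simpa [pvKey, PySem.List.count_eq, PySem.List.slice_to_natCast, List.count, ← ht]
    using PySem.List.foldl_count_if (fun x => x == "1") t 0

theorem pvKey_le (A : List (List String)) (w : Nat) (i : Int) :
    pvKey A w i ≤ (w : Int) := by
  have h3 : pvKey A w i = ((List.count "1" ((PySem.List.pyGetD A i []).take w) : Nat) : Int) := by
    simp [pvKey, PySem.List.count_eq, PySem.List.slice_to_natCast]
  have h2 : ((PySem.List.pyGetD A i []).take w).length ≤ w := by simp
  rw [h3]
  exact_mod_cast le_trans List.count_le_length h2

-- the tournament equals the first-argmin fold over the flat index range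
theorem pvBest_eq (A : List (List String)) (w lo hi : Nat) (h : lo < hi) :
    (pvBest A w lo hi : Int)
      = pvFam (pvKey A w) (lo : Int) (PySem.List.pyRange ((lo : Int) + 1) (hi : Int) 1) := by
  by_cases hb : hi - lo ≤ 1
  · have hhi : hi = lo + 1 := by omega
    rw [pvBest, if_pos hb, hhi]
    have h1 : ((lo : Int) + 1 : Int) = ((lo + 1 : Nat) : Int) := by push_cast; ring
    rw [h1, PySem.List.pyRange_one_eq_nil (le_refl _)]
    rfl
  · rw [pvBest, if_neg hb]
    have hm1 : lo < (lo + hi) / 2 := by omega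
    have hm2 : (lo + hi) / 2 < hi := by omega
    have ihl := pvBest_eq A w lo ((lo + hi) / 2) hm1
    have ihr := pvBest_eq A w ((lo + hi) / 2) hi hm2
    set mid := (lo + hi) / 2 with hmid
    have hsplit : PySem.List.pyRange ((lo : Int) + 1) (hi : Int) 1
        = PySem.List.pyRange ((lo : Int) + 1) (mid : Int) 1 ++ PySem.List.pyRange (mid : Int) (hi : Int) 1 :=
      PySem.List.pyRange_one_append _ _ _ (by exact_mod_cast hm1) (by exact_mod_cast le_of_lt hm2)
    have hcons : PySem.List.pyRange (mid : Int) (hi : Int) 1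
        = (mid : Int) :: PySem.List.pyRange ((mid : Int) + 1) (hi : Int) 1 :=
      PySem.List.pyRange_one_cons (by exact_mod_cast hm2)
    rw [hsplit]
    simp only [pvFam, List.foldl_append]
    have hL : List.foldl (fun m i => if pvKey A w i < pvKey A w m then i else m) (lo : Int)
        (PySem.List.pyRange ((lo : Int) + 1) (mid : Int) 1) = (pvBest A w lo mid : Int) := by
      rw [ihl]; rfl
    rw [hL, hcons]
    have hfc := pvFam_cons (pvKey A w) ((pvBest A w lo mid : Nat) : Int) (mid : Int)
        (PySem.List.pyRange ((mid : Int) + 1) (hi : Int) 1)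
    simp only [pvFam] at hfc
    rw [hfc]
    have hR : List.foldl (fun m i => if pvKey A w i < pvKey A w m then i else m) (mid : Int)
        (PySem.List.pyRange ((mid : Int) + 1) (hi : Int) 1) = (pvBest A w mid hi : Int) := by
      rw [ihr]; rfl
    rw [hR, ← pvOnes_eq, ← pvOnes_eq]
    by_cases hle : pvOnes A w (pvBest A w lo mid) ≤ pvOnes A w (pvBest A w mid hi)
    · rw [if_pos hle, if_neg (not_lt.mpr hle)]
    · rw [if_neg hle, if_pos (not_le.mp hle)]
termination_by hi - lo
decreasing_by all_goals omega

-- ===== VERDICT (by name: the statement is the Claim_ definition above) =====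
theorem choose_shortest_row_spec : Claim_equal_choose_shortest_row := by
  intro A _ hPre
  unfold Spec_choose_shortest_row
  by_cases hA : A = []
  · simp [choose_shortest_row, choose_shortest_row_alt, hA]
  · have hn : 0 < A.length := List.length_pos_iff.mpr hA
    unfold choose_shortest_row choose_shortest_row_alt
    rw [if_neg hA, if_neg hA]
    show (List.foldl
        (fun (st : Int × Int) i =>
          if (List.foldl (fun c j => if PySem.List.pyGetD (PySem.List.pyGetD A i []) j "" = "1" then c + 1 else c)
                (0 : Int) (PySem.List.pyRange 0 ((PySem.List.pyGetD A 0 []).length : Int) 1)) < st.1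
          then ((List.foldl (fun c j => if PySem.List.pyGetD (PySem.List.pyGetD A i []) j "" = "1" then c + 1 else c)
                (0 : Int) (PySem.List.pyRange 0 ((PySem.List.pyGetD A 0 []).length : Int) 1)), i) else st)
        (((PySem.List.pyGetD A 0 []).length : Int), 0) (PySem.List.pyRange 0 (A.length : Int) 1)).2
      = (pvBest A (PySem.List.pyGetD A 0 []).length 0 A.length : Int)
    set w := (PySem.List.pyGetD A 0 []).length with hw
    have hkey : ∀ i : Int, 0 ≤ i → i < (A.length : Int) →
        (PySem.List.pyRange 0 (w : Int) 1).foldl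
          (fun c j => if PySem.List.pyGetD (PySem.List.pyGetD A i []) j "" = "1" then c + 1 else c)
          (0 : Int) = pvKey A w i := by
      intro i h0 h1
      have hrow : PySem.List.pyGetD A i [] = A[i.toNat]'(by omega) :=
        PySem.List.pyGetD_eq_getElem A [] h0 h1
      have hlen : w ≤ (PySem.List.pyGetD A i []).length := by
        rw [hrow]; exact hPre _ (List.getElem_mem _)
      exact pv_inner A w i hlen
    have hr : PySem.List.pyRange 0 (A.length : Int) 1
        = 0 :: PySem.List.pyRange 1 (A.length : Int) 1 :=
      PySem.List.pyRange_one_cons (by exact_mod_cast hn)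
    rw [hr]
    simp only [List.foldl_cons]
    have hk0 := hkey 0 le_rfl (by exact_mod_cast hn)
    have hfirst :
        (if (PySem.List.pyRange 0 (w : Int) 1).foldl
            (fun c j => if PySem.List.pyGetD (PySem.List.pyGetD A 0 []) j "" = "1" then c + 1 else c)
            (0 : Int) < ((w : Nat) : Int) then
          ((PySem.List.pyRange 0 (w : Int) 1).foldl
            (fun c j => if PySem.List.pyGetD (PySem.List.pyGetD A 0 []) j "" = "1" then c + 1 else c)
            (0 : Int), (0 : Int))
        else (((w : Nat) : Int), (0 : Int))) = (pvKey A w 0, 0) := by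
      rw [hk0]
      by_cases h : pvKey A w 0 < (w : Int)
      · rw [if_pos h]
      · rw [if_neg h]
        have : pvKey A w 0 = (w : Int) := le_antisymm (pvKey_le A w 0) (by omega)
        rw [this]
    rw [hfirst]
    have hcongr : (PySem.List.pyRange 1 (A.length : Int) 1).foldl
        (fun (st : Int × Int) i =>
          if (List.foldl (fun c j => if PySem.List.pyGetD (PySem.List.pyGetD A i []) j "" = "1" then c + 1 else c)
                (0 : Int) (PySem.List.pyRange 0 (w : Int) 1)) < st.1
          then ((List.foldl (fun c j => if PySem.List.pyGetD (PySem.List.pyGetD A i []) j "" = "1" then c + 1 else c)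
                (0 : Int) (PySem.List.pyRange 0 (w : Int) 1)), i) else st)
        (pvKey A w 0, 0)
      = (PySem.List.pyRange 1 (A.length : Int) 1).foldl
          (fun (st : Int × Int) i => if pvKey A w i < st.1 then (pvKey A w i, i) else st) (pvKey A w 0, 0) := by
      apply PySem.List.foldl_congr_mem
      intro acc i hi
      rw [PySem.List.mem_pyRange_one] at hi
      rw [hkey i (by omega) hi.2]
    rw [hcongr, pv_fold_bridge (pvKey A w) (PySem.List.pyRange 1 (A.length : Int) 1) 0]
    rw [pvBest_eq A w 0 A.length hn]
    norm_num
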